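-- pv_equiv track=rewrite | github.com/RobustGuy69/COMP-5076-ASM-2 | # timetable_manager.py | get_days_view
-- ===== SOURCE A (Python) =====
-- def get_days_view(week_start):
--     """
--     Return (labels, mapping) where labels are day names starting at week_start,
--     and mapping maps relative index to absolute day index.
--     Absolute indices: 0=Sun..6=Sat.
--     """
--     absolute_labels = ["Sun", "Mon", "Tue", "Wed", "Thu", "Fri", "Sat"]
--     labels = [None] * 7
--     mapping = [0] * 7
--     i = 0
--     while i < 7:
--         abs_idx = (week_start + i) % 7
--         labels[i] = absolute_labels[abs_idx]
--         mapping[i] = abs_idx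
--         i = i + 1
--     return (labels, mapping)
-- ===== SOURCE B (Python) =====
-- def get_days_view(week_start):
--     absolute_labels = ["Sun", "Mon", "Tue", "Wed", "Thu", "Fri", "Sat"]
--     s = week_start % 7
--     labels = absolute_labels[s:] + absolute_labels[:s]
--     mapping = list(range(s, 7)) + list(range(0, s))
--     return (labels, mapping)
-- ===== Notes on version B (the rewrite author's own statement) =====
-- stated objective: simpler
-- what changed: Replaces the per-index while loop writing into preallocated lists with a closed-form rotation: normalize s = week_start % 7 once, then slice-concatenate the labels and build the mapping from two ranges.
import Mathlib
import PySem

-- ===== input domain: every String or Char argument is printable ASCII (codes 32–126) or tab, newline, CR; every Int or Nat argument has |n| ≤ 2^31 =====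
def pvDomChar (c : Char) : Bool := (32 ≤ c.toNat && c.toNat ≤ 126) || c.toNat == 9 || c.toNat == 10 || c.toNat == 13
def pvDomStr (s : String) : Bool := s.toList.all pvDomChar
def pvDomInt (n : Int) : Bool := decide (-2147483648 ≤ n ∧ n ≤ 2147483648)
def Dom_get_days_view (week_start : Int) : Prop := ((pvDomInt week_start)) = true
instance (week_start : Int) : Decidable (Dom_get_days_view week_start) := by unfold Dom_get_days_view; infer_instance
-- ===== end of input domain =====

-- B replaces A's per-index while loop by a closed-form slice rotation at s = week_start % 7 (objective: simpler).

-- ===== PORT A =====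
-- while loop ported as a foldl over the 7 iteration indices, writing into the
-- preallocated lists with List.set exactly as the Python loop does; Python's
-- [None]*7 placeholder list is modelled with "" placeholders (every slot is
-- overwritten before return). absolute_labels[abs_idx] uses pyGet? (always in
-- range since abs_idx = (…) % 7 ∈ [0,7)); the .getD "" default never fires.
def get_days_view (week_start : Int) : List String × List Int :=
  let absolute_labels : List String := ["Sun", "Mon", "Tue", "Wed", "Thu", "Fri", "Sat"]
  let st :=
    (List.range 7).foldl
      (fun (st : List String × List Int) (i : Nat) =>
        let abs_idx := PySem.Int.mod (week_start + (i : Int)) 7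
        (st.1.set i ((PySem.List.pyGet? absolute_labels abs_idx).getD ""),
         st.2.set i abs_idx))
      (List.replicate 7 "", List.replicate 7 0)
  (st.1, st.2)

-- ===== PORT B =====
def get_days_view_alt (week_start : Int) : List String × List Int :=
  let absolute_labels : List String := ["Sun", "Mon", "Tue", "Wed", "Thu", "Fri", "Sat"]
  let s := PySem.Int.mod week_start 7
  let labels := PySem.List.slice absolute_labels (some s) none
                  ++ PySem.List.slice absolute_labels none (some s)
  let mapping := PySem.List.pyRange s 7 1 ++ PySem.List.pyRange 0 s 1
  (labels, mapping)

-- ===== PRECONDITION & SPEC =====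
def Spec_get_days_view (week_start : Int) (out : List String × List Int) : Prop := out = get_days_view_alt week_start
instance (week_start : Int) (out : List String × List Int) : Decidable (Spec_get_days_view week_start out) := by unfold Spec_get_days_view; infer_instance

-- ===== CLAIM (what is proved, stated in full; the proofs are below) =====
def Claim_equal_get_days_view : Prop := ∀ (week_start : Int), Dom_get_days_view week_start → Spec_get_days_view week_start (get_days_view week_start)

-- ===== LEMMAS AND PROOFS =====

-- Both ports depend on week_start only through week_start % 7.
theorem get_days_view_mod (w : Int) : get_days_view w = get_days_view (w % 7) := by
  have hmod : ∀ i : Int, PySem.Int.mod (w + i) 7 = PySem.Int.mod (w % 7 + i) 7 := by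
    intro i; simp [PySem.Int.mod, Int.fmod_eq_emod]
  simp only [get_days_view, List.range, List.range.loop, List.foldl]
  simp only [hmod]

theorem get_days_view_alt_mod (w : Int) : get_days_view_alt w = get_days_view_alt (w % 7) := by
  have hmod : PySem.Int.mod w 7 = PySem.Int.mod (w % 7) 7 := by
    simp [PySem.Int.mod, Int.fmod_eq_emod]
  simp only [get_days_view_alt, hmod]

-- ===== VERDICT (by name: the statement is the Claim_ definition above) =====
theorem get_days_view_spec : Claim_equal_get_days_view := by
  intro w _
  show get_days_view w = get_days_view_alt w
  rw [get_days_view_mod, get_days_view_alt_mod]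
  have h : w % 7 = 0 ∨ w % 7 = 1 ∨ w % 7 = 2 ∨ w % 7 = 3 ∨ w % 7 = 4 ∨ w % 7 = 5 ∨ w % 7 = 6 := by omega
  rcases h with h | h | h | h | h | h | h <;> rw [h] <;> decide
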